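-- pv_equiv track=rewrite | github.com/MattlearnPython/music-sheet-recognition | SMIRKs_head.py | determine_edge
-- ===== SOURCE A (Python) =====
-- def determine_edge(hist, median):
--     width = len(hist)
--
--     count = 0
--     for i in range(width):
--         if hist[i] > median and count == 0:
--             count += 1
--             start = i - 1
--
--         if hist[i] <= median and count == 1:
--             end = i - 1
--             break
--     return start, end
-- ===== SOURCE B (Python) =====
-- def determine_edge(hist, median):
--     # Single backward pass: while scanning right-to-left, remember the nearest
--     # index at-or-below the median seen so far (i.e. to the right), and at each
--     # element above the median rebuild the candidate answer from it; the last
--     # (leftmost) rise processed wins, matching the forward semantics.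
--     first_le = None
--     ans = None
--     for i in range(len(hist) - 1, -1, -1):
--         if hist[i] > median:
--             ans = (i - 1, first_le - 1) if first_le is not None else None
--         else:
--             first_le = i
--     start, end = ans
--     return start, end
-- ===== Notes on version B (the rewrite author's own statement) =====
-- stated objective: alternative
-- what changed: Replaces A's forward flag-driven loop with a single right-to-left pass that maintains the nearest at-or-below-median index to the right and rebuilds the candidate (start, end) at each above-median element, the leftmost one winning.
import Mathlib
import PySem

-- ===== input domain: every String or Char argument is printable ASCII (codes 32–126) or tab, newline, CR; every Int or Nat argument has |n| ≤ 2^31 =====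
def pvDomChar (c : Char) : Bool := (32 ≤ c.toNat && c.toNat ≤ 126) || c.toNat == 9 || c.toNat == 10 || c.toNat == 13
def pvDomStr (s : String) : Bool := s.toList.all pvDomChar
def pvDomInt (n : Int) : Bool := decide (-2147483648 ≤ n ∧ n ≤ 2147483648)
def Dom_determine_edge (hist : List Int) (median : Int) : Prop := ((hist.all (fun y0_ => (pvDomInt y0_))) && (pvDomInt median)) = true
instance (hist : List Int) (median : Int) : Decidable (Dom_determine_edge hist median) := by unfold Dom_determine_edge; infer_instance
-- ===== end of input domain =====

-- B replaces A's forward flag-driven loop with a single right-to-left pass keeping the nearest at-or-below-median index to the right (objective: alternative).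
-- Where A raises UnboundLocalError (no rising edge, or none followed by a value ≤ median), B raises too; Pre_ excludes those inputs.


-- ===== PORT A =====
-- A's loop, step for step: state is (count, start); start starts unbound (none);
-- `break` returns `some (start, end)`; falling off the loop, or breaking with start
-- still unbound, is Python's UnboundLocalError → none (excluded by Pre_).
def determine_edge_loopA (median : Int) : List Int → Int → Int → Option Int → Option (Int × Int)
  | [], _, _, _ => none
  | h :: t, i, count, start =>
    let p : Int × Option Int :=
      if h > median ∧ count = 0 then (count + 1, some (i - 1)) else (count, start)
    if h ≤ median ∧ p.1 = 1 then p.2.map (fun s => (s, i - 1))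
    else determine_edge_loopA median t (i + 1) p.1 p.2

def determine_edge (hist : List Int) (median : Int) : Int × Int :=
  (determine_edge_loopA median hist 0 0 none).getD (0, 0)  -- default is never reached under Pre_ (A raises there)

-- ===== PORT B =====
-- B's backward pass: recurse on the tail first (elements to the right), getting
-- (first_le, ans) for the suffix, then process the current element, exactly as
-- Source B's descending loop does. State: nearest index with value ≤ median to the
-- right (Option Int), and the candidate answer (Option (Int × Int)).
def determine_edge_loopB (median : Int) : List Int → Int → Option Int × Option (Int × Int)
  | [], _ => (none, none)
  | x :: t, i =>
    let st := determine_edge_loopB median t (i + 1)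
    if median < x then (st.1, st.1.map (fun j => (i - 1, j - 1)))
    else (some i, st.2)

def determine_edge_alt (hist : List Int) (median : Int) : Int × Int :=
  ((determine_edge_loopB median hist 0).2).getD (0, 0)  -- default is never reached under Pre_ (Source B raises there)

-- ===== PRECONDITION & SPEC =====
-- Pre_ excludes exactly the inputs on which A raises UnboundLocalError: those with no
-- element above the median followed (strictly later) by an element ≤ the median.
def Pre_determine_edge (hist : List Int) (median : Int) : Prop :=
  ∃ i j : Fin hist.length, (i : Nat) < (j : Nat) ∧ median < hist.get i ∧ hist.get j ≤ median
instance (hist : List Int) (median : Int) : Decidable (Pre_determine_edge hist median) := by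
  unfold Pre_determine_edge; infer_instance
def pvWitness_determine_edge : List Int × Int := ([1, 0], 0)

def Spec_determine_edge (hist : List Int) (median : Int) (out : Int × Int) : Prop := out = determine_edge_alt hist median
instance (hist : List Int) (median : Int) (out : Int × Int) : Decidable (Spec_determine_edge hist median out) := by unfold Spec_determine_edge; infer_instance

-- ===== CLAIM (what is proved, stated in full; the proofs are below) =====
def Claim_equal_determine_edge : Prop := ∀ (hist : List Int) (median : Int), Dom_determine_edge hist median → Pre_determine_edge hist median → Spec_determine_edge hist median (determine_edge hist median)

-- ===== LEMMAS AND PROOFS =====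

-- Phase 2 of A's loop (count = 1, start bound): it breaks at the first element ≤ median.
theorem loopA_phase2 (median : Int) (l : List Int) (s : Int) :
    ∀ i : Int, determine_edge_loopA median l i 1 (some s)
      = (l.findIdx? (fun x => decide (x ≤ median))).map (fun k => (s, i + k - 1)) := by
  induction l with
  | nil => intro i; simp [determine_edge_loopA]
  | cons h t ih =>
    intro i
    rw [determine_edge_loopA, List.findIdx?_cons]
    by_cases hle : h ≤ median
    · simp [hle]
    · have hgt : median < h := lt_of_not_ge hle
      simp only [hle, decide_false, if_false, false_and, if_false,
        if_neg (by omega : ¬ (h > median ∧ (1:Int) = 0))]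
      rw [ih (i + 1)]
      cases t.findIdx? (fun x => decide (x ≤ median)) with
      | none => rfl
      | some k => simp; ring_nf

-- Phase 1 of A's loop (count = 0, start unbound): it skips to the first element > median.
theorem loopA_phase1 (median : Int) (l : List Int) :
    ∀ i : Int, determine_edge_loopA median l i 0 none
      = match l.findIdx? (fun x => decide (median < x)) with
        | none => none
        | some k => determine_edge_loopA median (l.drop (k + 1)) (i + k + 1) 1 (some (i + k - 1)) := by
  induction l with
  | nil => intro i; simp [determine_edge_loopA]
  | cons h t ih =>
    intro i
    rw [determine_edge_loopA, List.findIdx?_cons]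
    by_cases hgt : median < h
    · have : ¬ h ≤ median := not_le.mpr hgt
      simp [hgt, this]
    · have hle : h ≤ median := le_of_not_gt hgt
      simp only [hgt, decide_false, false_and, if_false, Bool.false_eq_true]
      rw [if_neg (by omega : ¬ (h ≤ median ∧ (0:Int) = 1)), ih (i + 1)]
      cases t.findIdx? (fun x => decide (median < x)) with
      | none => rfl
      | some k =>
        simp only [Option.map_some, List.drop_succ_cons]
        push_cast
        ring_nf

-- B's running `first_le` is the first index (from the current position) holding a value ≤ median.
theorem loopB_fst (median : Int) (l : List Int) :
    ∀ i : Int, (determine_edge_loopB median l i).1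
      = (l.findIdx? (fun x => decide (x ≤ median))).map (fun k => i + k) := by
  induction l with
  | nil => intro i; simp [determine_edge_loopB]
  | cons h t ih =>
    intro i
    rw [determine_edge_loopB, List.findIdx?_cons]
    by_cases hgt : median < h
    · have hle : ¬ h ≤ median := not_le.mpr hgt
      simp only [if_pos hgt, hle, decide_false]
      rw [ih (i + 1)]
      cases t.findIdx? (fun x => decide (x ≤ median)) with
      | none => rfl
      | some k => simp; ring
    · simp [hgt, le_of_not_gt hgt]

-- B's answer, in closed form: the first rise paired with the first subsequent fall.
theorem loopB_snd (median : Int) (l : List Int) :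
    ∀ i : Int, (determine_edge_loopB median l i).2
      = match l.findIdx? (fun x => decide (median < x)) with
        | none => none
        | some k => ((l.drop (k + 1)).findIdx? (fun x => decide (x ≤ median))).map
            (fun m => (i + k - 1, i + k + 1 + m - 1)) := by
  induction l with
  | nil => intro i; simp [determine_edge_loopB]
  | cons h t ih =>
    intro i
    rw [determine_edge_loopB, List.findIdx?_cons]
    by_cases hgt : median < h
    · simp only [hgt, decide_true]
      rw [loopB_fst]
      cases hfi : t.findIdx? (fun x => decide (x ≤ median)) with
      | none => simp [hfi]
      | some k => simp [hfi]
    · have hle : h ≤ median := le_of_not_gt hgt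
      simp only [hgt, decide_false, if_false, Bool.false_eq_true]
      rw [ih (i + 1)]
      cases t.findIdx? (fun x => decide (median < x)) with
      | none => rfl
      | some k =>
        simp only [Option.map_some, List.drop_succ_cons]
        push_cast
        ring_nf

theorem determine_edge_eq_alt (hist : List Int) (median : Int) :
    determine_edge hist median = determine_edge_alt hist median := by
  unfold determine_edge determine_edge_alt
  rw [loopA_phase1, loopB_snd]
  cases hf : hist.findIdx? (fun x => decide (median < x)) with
  | none => rfl
  | some i =>
    dsimp only
    rw [loopA_phase2]

-- ===== VERDICT (by name: the statement is the Claim_ definition above) =====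
theorem determine_edge_spec : Claim_equal_determine_edge := by
  intro hist median _ _
  unfold Spec_determine_edge
  exact determine_edge_eq_alt hist median
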